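-- pv_equiv track=rewrite | github.com/jetm/shipcheck | src/shipcheck/report/reconcile.py | _max_severity
-- ===== SOURCE A (Python) =====
-- _SEVERITY_ORDER = {
--     "critical": 4,
--     "high": 3,
--     "medium": 2,
--     "low": 1,
--     "info": 0,
-- }
--
-- def _max_severity(severities: list[str]) -> str:
--     """Return the highest severity per the critical > ... > info ordering.
--
--     Input strings are compared case-insensitively. Unknown severities
--     rank below ``info``. The returned value is whichever input string
--     had the highest rank, preserving its original casing.
--     """
--     best_rank = -1
--     best: str = severities[0] if severities else "info"
--     for sev in severities:
--         rank = _SEVERITY_ORDER.get(sev.lower(), -1)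
--         if rank > best_rank:
--             best_rank = rank
--             best = sev
--     return best
-- ===== SOURCE B (Python) =====
-- def _max_severity(severities: list[str]) -> str:
--     """Return the highest severity per the critical > ... > info ordering.
--
--     Scans the fixed priority ranking from highest to lowest and returns
--     the first input string (original casing) matching the current level;
--     falls back to the first input (or "info" when empty) when no input
--     names a known severity.
--     """
--     for level in ("critical", "high", "medium", "low", "info"):
--         for sev in severities:
--             if sev.lower() == level:
--                 return sev
--     return severities[0] if severities else "info"
-- ===== Notes on version B (the rewrite author's own statement) =====
-- stated objective: alternative
-- what changed: Replaces A's single fold that maintains a running best-rank/best-string pair with a nested scan: iterate the fixed severity ranking from highest to lowest and return the first input whose lowercase form names that level, falling back to the first input (or 'info' when empty).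
import Mathlib
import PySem

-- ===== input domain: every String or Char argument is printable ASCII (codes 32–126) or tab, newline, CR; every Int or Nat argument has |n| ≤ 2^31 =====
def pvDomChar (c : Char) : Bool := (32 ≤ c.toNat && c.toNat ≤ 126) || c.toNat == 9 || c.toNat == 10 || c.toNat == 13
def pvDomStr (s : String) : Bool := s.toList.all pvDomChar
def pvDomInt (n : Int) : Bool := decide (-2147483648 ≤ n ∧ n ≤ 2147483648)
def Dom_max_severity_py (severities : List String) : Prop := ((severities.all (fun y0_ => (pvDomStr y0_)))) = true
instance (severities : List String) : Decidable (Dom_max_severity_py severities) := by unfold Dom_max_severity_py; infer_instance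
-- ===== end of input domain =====

-- B replaces A's running best-rank fold by a nested scan over the fixed priority
-- ranking with early return (objective: alternative decomposition, same cost class).

-- ===== PORT A =====
-- _SEVERITY_ORDER
def pvSevOrder : PySem.Dict String Int :=
  PySem.Dict.ofList [("critical", 4), ("high", 3), ("medium", 2), ("low", 1), ("info", 0)]

def max_severity_py (severities : List String) : String :=
  -- best_rank = -1; best = severities[0] if severities else "info"; for sev in severities: …
  (severities.foldl
    (fun (st : Int × String) sev =>
      let rank := pvSevOrder.getD (PySem.Str.lower sev) (-1)
      if rank > st.1 then (rank, sev) else st)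
    (-1, match severities with | [] => "info" | s :: _ => s)).2

-- ===== PORT B =====
def pvLevels : List String := ["critical", "high", "medium", "low", "info"]

def max_severity_py_alt (severities : List String) : String :=
  -- for level in (…): for sev in severities: if sev.lower() == level: return sev
  match pvLevels.findSome?
      (fun level => severities.find? (fun sev => PySem.Str.lower sev == level)) with
  | some sev => sev
  -- return severities[0] if severities else "info"
  | none => match severities with | [] => "info" | s :: _ => s

-- ===== PRECONDITION & SPEC =====
def Spec_max_severity_py (severities : List String) (out : String) : Prop := out = max_severity_py_alt severities
instance (severities : List String) (out : String) : Decidable (Spec_max_severity_py severities out) := by unfold Spec_max_severity_py; infer_instance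

-- ===== CLAIM (what is proved, stated in full; the proofs are below) =====
def Claim_equal_max_severity_py : Prop := ∀ (severities : List String), Dom_max_severity_py severities → Spec_max_severity_py severities (max_severity_py severities)

-- ===== LEMMAS AND PROOFS =====

-- rank of one input string, as A computes it
def pvRnk (s : String) : Int := pvSevOrder.getD (PySem.Str.lower s) (-1)

-- A's loop body, named
def pvStepA (st : Int × String) (sev : String) : Int × String :=
  if pvRnk sev > st.1 then (pvRnk sev, sev) else st

-- running maximum of the ranks
def pvMx (l : List String) (i : Int) : Int := l.foldl (fun m x => max m (pvRnk x)) i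

theorem pvRnk_cases (s : String) : pvRnk s =
    if PySem.Str.lower s = "critical" then 4
    else if PySem.Str.lower s = "high" then 3
    else if PySem.Str.lower s = "medium" then 2
    else if PySem.Str.lower s = "low" then 1
    else if PySem.Str.lower s = "info" then 0 else -1 := by
  simp [pvRnk, pvSevOrder, PySem.Dict.ofList, PySem.Dict.getD_eq_get?_getD, PySem.Dict.update,
    List.foldl, PySem.Dict.get?_insert, PySem.Dict.get?_empty]
  split_ifs <;> simp_all

theorem pvRnk_bounds (s : String) : -1 ≤ pvRnk s ∧ pvRnk s ≤ 4 := by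
  rw [pvRnk_cases]; split_ifs <;> omega

theorem pvMx_ge (l : List String) (i : Int) : i ≤ pvMx l i := by
  induction l generalizing i with
  | nil => simp [pvMx]
  | cons x l ih =>
      have := ih (max i (pvRnk x))
      simp only [pvMx, List.foldl_cons] at *
      omega

theorem pvMx_le (l : List String) (i : Int) (hi : i ≤ 4) : pvMx l i ≤ 4 := by
  induction l generalizing i with
  | nil => simpa [pvMx]
  | cons x l ih =>
      have hx := (pvRnk_bounds x).2
      simp only [pvMx, List.foldl_cons] at *
      exact ih _ (by omega)

theorem pvMx_mem_le (l : List String) (i : Int) (x : String) (hx : x ∈ l) :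
    pvRnk x ≤ pvMx l i := by
  induction l generalizing i with
  | nil => cases hx
  | cons y l ih =>
      rcases List.mem_cons.mp hx with hx | hx
      · subst hx
        have h1 : max i (pvRnk x) ≤ pvMx l (max i (pvRnk x)) := pvMx_ge l _
        simp only [pvMx, List.foldl_cons] at *
        omega
      · simpa only [pvMx, List.foldl_cons] using ih _ hx

theorem pvMx_attained (l : List String) (i : Int) (h : i < pvMx l i) :
    ∃ y ∈ l, pvRnk y = pvMx l i := by
  induction l generalizing i with
  | nil => simp [pvMx] at h
  | cons x l ih =>
      by_cases hx : pvRnk x = pvMx (x :: l) i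
      · exact ⟨x, List.mem_cons_self, hx⟩
      · have hM : pvMx (x :: l) i = pvMx l (max i (pvRnk x)) := rfl
        have hge : max i (pvRnk x) ≤ pvMx l (max i (pvRnk x)) := pvMx_ge l _
        have hlt : max i (pvRnk x) < pvMx l (max i (pvRnk x)) := by
          rw [hM] at hx h; omega
        obtain ⟨y, hy, hy2⟩ := ih _ hlt
        exact ⟨y, List.mem_cons_of_mem _ hy, by rw [hM]; exact hy2⟩

theorem pvFind_attained (l : List String) (i : Int) (h : i < pvMx l i) :
    ∃ y, l.find? (fun x => pvRnk x == pvMx l i) = some y ∧ pvRnk y = pvMx l i := by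
  obtain ⟨y, hy, hy2⟩ := pvMx_attained l i h
  have hs : (l.find? (fun x => pvRnk x == pvMx l i)).isSome = true :=
    List.find?_isSome.mpr ⟨y, hy, by simp [hy2]⟩
  obtain ⟨z, hz⟩ := Option.isSome_iff_exists.mp hs
  exact ⟨z, hz, by simpa using List.find?_some hz⟩

theorem pvFoldA_eq (l : List String) (br : Int) (b : String) :
    l.foldl pvStepA (br, b) =
      (pvMx l br,
        if br < pvMx l br then (l.find? (fun x => pvRnk x == pvMx l br)).getD b else b) := by
  induction l generalizing br b with
  | nil => simp [pvMx]
  | cons x l ih =>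
      have hM : pvMx (x :: l) br = pvMx l (max br (pvRnk x)) := rfl
      by_cases h : pvRnk x > br
      · have hmax : max br (pvRnk x) = pvRnk x := by omega
        have hstep : pvStepA (br, b) x = (pvRnk x, x) := by simp [pvStepA, h]
        rw [List.foldl_cons, hstep, ih]
        have hge : pvRnk x ≤ pvMx l (pvRnk x) := pvMx_ge l _
        rw [hM, hmax]
        by_cases hx : pvRnk x = pvMx l (pvRnk x)
        · simp [← hx, List.find?_cons_of_pos]
          omega
        · have hlt : pvRnk x < pvMx l (pvRnk x) := by omega
          have hbr : br < pvMx l (pvRnk x) := by omega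
          obtain ⟨y, hy, -⟩ := pvFind_attained l (pvRnk x) hlt
          rw [List.find?_cons_of_neg (p := fun z => pvRnk z == pvMx l (pvRnk x)) (by simp [hx])]
          simp [hlt, hbr, hy]
      · have hmax : max br (pvRnk x) = br := by omega
        have hstep : pvStepA (br, b) x = (br, b) := by simp [pvStepA, h]
        rw [List.foldl_cons, hstep, ih, hM, hmax]
        by_cases hc : br < pvMx l br
        · have hxne : ¬ (pvRnk x == pvMx l br) = true := by
            simp only [beq_iff_eq]; omega
          rw [List.find?_cons_of_neg (p := fun z => pvRnk z == pvMx l br) hxne]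
        · simp [hc]

-- the predicate B scans with, per level, equals a rank test
theorem pvLevel_pred (k : Int) (name : String)
    (hk : (name = "critical" ∧ k = 4) ∨ (name = "high" ∧ k = 3) ∨ (name = "medium" ∧ k = 2) ∨
          (name = "low" ∧ k = 1) ∨ (name = "info" ∧ k = 0)) (x : String) :
    (PySem.Str.lower x == name) = (pvRnk x == k) := by
  rw [pvRnk_cases]
  rcases hk with ⟨h1, h2⟩ | ⟨h1, h2⟩ | ⟨h1, h2⟩ | ⟨h1, h2⟩ | ⟨h1, h2⟩ <;>
    subst h1 <;> subst h2 <;> split_ifs <;> simp_all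

theorem max_severity_py_spec : Claim_equal_max_severity_py := by
  intro l _
  unfold Spec_max_severity_py
  have hfind : ∀ (name : String) (j : Int),
      ((name = "critical" ∧ j = 4) ∨ (name = "high" ∧ j = 3) ∨ (name = "medium" ∧ j = 2) ∨
       (name = "low" ∧ j = 1) ∨ (name = "info" ∧ j = 0)) →
      l.find? (fun sev => PySem.Str.lower sev == name) = l.find? (fun x => pvRnk x == j) := by
    intro name j hk
    have hp : (fun sev => PySem.Str.lower sev == name) = (fun x => pvRnk x == j) :=
      funext (pvLevel_pred j name hk)
    rw [hp]
  cases l with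
  | nil => rfl
  | cons s t =>
    have hA : max_severity_py (s :: t) =
        (if -1 < pvMx (s :: t) (-1) then
          ((s :: t).find? (fun x => pvRnk x == pvMx (s :: t) (-1))).getD s
         else s) := by
      have h0 : max_severity_py (s :: t) = ((s :: t).foldl pvStepA (-1, s)).2 := rfl
      rw [h0, pvFoldA_eq]
    have hub : ∀ x ∈ s :: t, pvRnk x ≤ pvMx (s :: t) (-1) :=
      fun x hx => pvMx_mem_le _ _ _ hx
    have hnone : ∀ (name : String) (j : Int),
        ((name = "critical" ∧ j = 4) ∨ (name = "high" ∧ j = 3) ∨ (name = "medium" ∧ j = 2) ∨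
         (name = "low" ∧ j = 1) ∨ (name = "info" ∧ j = 0)) →
        pvMx (s :: t) (-1) < j →
        (s :: t).find? (fun sev => PySem.Str.lower sev == name) = none := by
      intro name j hk hj
      rw [hfind name j hk]
      apply List.find?_eq_none.mpr
      intro x hx
      simp only [beq_iff_eq]
      have := hub x hx
      omega
    have h1 : -1 ≤ pvMx (s :: t) (-1) := pvMx_ge _ _
    have h2 : pvMx (s :: t) (-1) ≤ 4 := pvMx_le _ _ (by omega)
    have hcase : pvMx (s :: t) (-1) = -1 ∨ pvMx (s :: t) (-1) = 0 ∨ pvMx (s :: t) (-1) = 1 ∨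
        pvMx (s :: t) (-1) = 2 ∨ pvMx (s :: t) (-1) = 3 ∨ pvMx (s :: t) (-1) = 4 := by omega
    rcases hcase with hM | hM | hM | hM | hM | hM
    · -- no known severity occurs: both fall back to the head
      have n4 := hnone "critical" 4 (Or.inl ⟨rfl, rfl⟩) (by omega)
      have n3 := hnone "high" 3 (Or.inr (Or.inl ⟨rfl, rfl⟩)) (by omega)
      have n2 := hnone "medium" 2 (Or.inr (Or.inr (Or.inl ⟨rfl, rfl⟩))) (by omega)
      have n1 := hnone "low" 1 (Or.inr (Or.inr (Or.inr (Or.inl ⟨rfl, rfl⟩)))) (by omega)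
      have n0 := hnone "info" 0 (Or.inr (Or.inr (Or.inr (Or.inr ⟨rfl, rfl⟩)))) (by omega)
      rw [hA, hM]
      simp [max_severity_py_alt, pvLevels, List.findSome?, n4, n3, n2, n1, n0]
    · obtain ⟨y, hy, -⟩ := pvFind_attained (s :: t) (-1) (by omega)
      rw [hM] at hy
      rw [hA, hM]
      have n4 := hnone "critical" 4 (Or.inl ⟨rfl, rfl⟩) (by omega)
      have n3 := hnone "high" 3 (Or.inr (Or.inl ⟨rfl, rfl⟩)) (by omega)
      have n2 := hnone "medium" 2 (Or.inr (Or.inr (Or.inl ⟨rfl, rfl⟩))) (by omega)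
      have n1 := hnone "low" 1 (Or.inr (Or.inr (Or.inr (Or.inl ⟨rfl, rfl⟩)))) (by omega)
      have e0 := hfind "info" 0 (Or.inr (Or.inr (Or.inr (Or.inr ⟨rfl, rfl⟩))))
      simp [max_severity_py_alt, pvLevels, List.findSome?, n4, n3, n2, n1, e0, hy]
    · obtain ⟨y, hy, -⟩ := pvFind_attained (s :: t) (-1) (by omega)
      rw [hM] at hy
      rw [hA, hM]
      have n4 := hnone "critical" 4 (Or.inl ⟨rfl, rfl⟩) (by omega)
      have n3 := hnone "high" 3 (Or.inr (Or.inl ⟨rfl, rfl⟩)) (by omega)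
      have n2 := hnone "medium" 2 (Or.inr (Or.inr (Or.inl ⟨rfl, rfl⟩))) (by omega)
      have e1 := hfind "low" 1 (Or.inr (Or.inr (Or.inr (Or.inl ⟨rfl, rfl⟩))))
      simp [max_severity_py_alt, pvLevels, List.findSome?, n4, n3, n2, e1, hy]
    · obtain ⟨y, hy, -⟩ := pvFind_attained (s :: t) (-1) (by omega)
      rw [hM] at hy
      rw [hA, hM]
      have n4 := hnone "critical" 4 (Or.inl ⟨rfl, rfl⟩) (by omega)
      have n3 := hnone "high" 3 (Or.inr (Or.inl ⟨rfl, rfl⟩)) (by omega)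
      have e2 := hfind "medium" 2 (Or.inr (Or.inr (Or.inl ⟨rfl, rfl⟩)))
      simp [max_severity_py_alt, pvLevels, List.findSome?, n4, n3, e2, hy]
    · obtain ⟨y, hy, -⟩ := pvFind_attained (s :: t) (-1) (by omega)
      rw [hM] at hy
      rw [hA, hM]
      have n4 := hnone "critical" 4 (Or.inl ⟨rfl, rfl⟩) (by omega)
      have e3 := hfind "high" 3 (Or.inr (Or.inl ⟨rfl, rfl⟩))
      simp [max_severity_py_alt, pvLevels, List.findSome?, n4, e3, hy]
    · obtain ⟨y, hy, -⟩ := pvFind_attained (s :: t) (-1) (by omega)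
      rw [hM] at hy
      rw [hA, hM]
      have e4 := hfind "critical" 4 (Or.inl ⟨rfl, rfl⟩)
      simp [max_severity_py_alt, pvLevels, e4, hy]
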